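-- pv_equiv track=rewrite | github.com/jung18/Algorithm | 프로그래머스/2/150369. 택배 배달과 수거하기/택배 배달과 수거하기.py | solution
-- ===== SOURCE A (Python) =====
-- def solution(cap, n, deliveries, pickups):
--     deliveries = [(i+1, deliveries[i]) for i in range(n) if deliveries[i]]
--     pickups = [(i+1, pickups[i]) for i in range(n) if pickups[i]]
--     answer = 0
--
--     def f(home):
--         max_dis = 0
--         tmp = 0
--         while home:
--             dis, box = home.pop()
--             max_dis = max(dis, max_dis)
--
--             if tmp + box > cap: # 다 못담으면 남겨놓기
--                 home.append((dis, (tmp+box) - cap))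
--                 break
--             else:
--                 tmp += box
--         return max_dis
--
--     while deliveries or pickups:
--         answer += max(f(deliveries), f(pickups)) * 2 # 배달, 픽업 중 더 먼거리 기준
--
--     return answer
-- ===== SOURCE B (Python) =====
-- def solution(cap, n, deliveries, pickups):
--     # One reverse pass, no stacks and no per-trip simulation.
--     # For house i+1 the number of truck visits is
--     #   (1 if some house >= i+1 still has a nonzero load) + max(0, ceil(M/cap) - 1)
--     # where M is the maximum suffix sum of the loads over houses >= i+1
--     # (a trip is issued each time the greedy far-first accumulation exceeds cap).
--     answer = 0
--     sd = sp = 0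
--     md = mp = 0
--     anyd = anyp = False
--     for i in range(n - 1, -1, -1):
--         sd += deliveries[i]
--         sp += pickups[i]
--         if deliveries[i]:
--             anyd = True
--         if pickups[i]:
--             anyp = True
--         if sd > md:
--             md = sd
--         if sp > mp:
--             mp = sp
--         cd = (1 if anyd else 0) + max(0, -(-md // cap) - 1)
--         cp = (1 if anyp else 0) + max(0, -(-mp // cap) - 1)
--         answer += 2 * max(cd, cp)
--     return answer
-- ===== Notes on version B (the rewrite author's own statement) =====
-- stated objective: alternative
-- what changed: Replace the two (position,count) stacks and the pop-based per-trip helper by a single reverse pass that keeps a suffix sum, its running maximum and a nonzero flag per array, adding per house 2*max of the closed-form visit counts (flag + max(0, ceil(runmax/cap)-1)) instead of simulating every trip.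
-- outside the precondition, e.g. on solution(0, 1, [0], [0]): A returns 0, B raises ZeroDivisionError
import Mathlib
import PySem

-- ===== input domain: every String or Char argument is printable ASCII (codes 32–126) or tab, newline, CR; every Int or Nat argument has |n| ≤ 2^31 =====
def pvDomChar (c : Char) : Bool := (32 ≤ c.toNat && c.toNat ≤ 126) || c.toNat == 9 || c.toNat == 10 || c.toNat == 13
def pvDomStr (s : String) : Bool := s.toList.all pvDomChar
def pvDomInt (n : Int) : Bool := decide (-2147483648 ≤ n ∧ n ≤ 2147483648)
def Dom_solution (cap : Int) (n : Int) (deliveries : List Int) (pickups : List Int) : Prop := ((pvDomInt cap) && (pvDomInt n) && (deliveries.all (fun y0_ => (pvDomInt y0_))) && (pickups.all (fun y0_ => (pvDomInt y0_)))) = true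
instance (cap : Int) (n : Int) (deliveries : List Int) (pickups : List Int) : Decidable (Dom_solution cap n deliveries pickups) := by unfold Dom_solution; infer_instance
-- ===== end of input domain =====

-- B replaces A's trip-by-trip stack simulation by one reverse pass that derives each
-- house's visit count from a running suffix sum and its running maximum (alternative algorithm).


-- ===== PORT A =====
-- xs[i] (only evaluated at in-range i under Pre_)
def pvGet (xs : List Int) (i : Int) : Int := PySem.List.pyGetD xs i 0

-- [(i+1, xs[i]) for i in range(n) if xs[i]]
def mkHome (xs : List Int) (n : Int) : List (Int × Int) :=
  (PySem.List.pyRange 0 n 1).filterMap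
    (fun i => if pvGet xs i ≠ 0 then some (i + 1, pvGet xs i) else none)

-- A's helper f: the Python stack is popped/pushed at its tail; we keep the stack
-- REVERSED (top of stack = head), so 'home.pop()' is taking the head and
-- 'home.append(x); break' is consing x back.  Same values, same steps.
def fA (cap : Int) : List (Int × Int) → Int → Int → Int × List (Int × Int)
  | [], _tmp, maxd => (maxd, [])
  | (dis, box) :: rest, tmp, maxd =>
    if cap < tmp + box then (max dis maxd, (dis, tmp + box - cap) :: rest)
    else fA cap rest (tmp + box) (max dis maxd)

-- A's outer 'while deliveries or pickups' loop; fuel only makes the recursion total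
-- (under Pre_ it is proved larger than the number of iterations, so it never bites).
def outerA (cap : Int) : Nat → List (Int × Int) → List (Int × Int) → Int → Int
  | 0, _, _, ans => ans
  | fuel + 1, sd, sp, ans =>
    if sd = [] ∧ sp = [] then ans
    else
      let rd := fA cap sd 0 0
      let rp := fA cap sp 0 0
      outerA cap fuel rd.2 rp.2 (ans + max rd.1 rp.1 * 2)

def solution (cap : Int) (n : Int) (deliveries : List Int) (pickups : List Int) : Int :=
  let sd := (mkHome deliveries n).reverse
  let sp := (mkHome pickups n).reverse
  outerA cap
    ((sd.map (fun pb => pb.2.natAbs + 1)).sum + (sp.map (fun pb => pb.2.natAbs + 1)).sum + 1)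
    sd sp 0

-- ===== PORT B =====
-- for i in range(n-1, -1, -1):
--   sd += deliveries[i]; sp += pickups[i]
--   if deliveries[i]: anyd = True
--   if pickups[i]: anyp = True
--   if sd > md: md = sd
--   if sp > mp: mp = sp
--   cd = (1 if anyd else 0) + max(0, -(-md // cap) - 1)
--   cp = (1 if anyp else 0) + max(0, -(-mp // cap) - 1)
--   answer += 2 * max(cd, cp)
-- altGo (k+1) processes index i = k, then recurses: indices n-1, n-2, …, 0.
def altGo (cap : Int) (ds ps : List Int) :
    Nat → Int → Int → Bool → Int → Int → Bool → Int → Int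
  | 0, _sd, _md, _ad, _sp, _mp, _ap, ans => ans
  | k + 1, sd, md, ad, sp, mp, ap, ans =>
    let sd' := sd + pvGet ds (k : Int)
    let sp' := sp + pvGet ps (k : Int)
    let ad' := ad || decide (pvGet ds (k : Int) ≠ 0)
    let ap' := ap || decide (pvGet ps (k : Int) ≠ 0)
    let md' := if md < sd' then sd' else md
    let mp' := if mp < sp' then sp' else mp
    let cd := (if ad' then 1 else 0) + max 0 (-(PySem.Int.floordiv (-md') cap) - 1)
    let cp := (if ap' then 1 else 0) + max 0 (-(PySem.Int.floordiv (-mp') cap) - 1)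
    altGo cap ds ps k sd' md' ad' sp' mp' ap' (ans + 2 * max cd cp)

def solution_alt (cap : Int) (n : Int) (deliveries : List Int) (pickups : List Int) : Int :=
  altGo cap deliveries pickups n.toNat 0 0 false 0 0 false 0

-- ===== PRECONDITION & SPEC =====
-- For n ≤ 0 both programs trivially return 0.  For n > 0, Pre_ excludes n > len
-- (IndexError in both programs) and restricts to the problem's natural domain
-- cap ≥ 1 (A does not terminate for cap ≤ 0 with a positive load, and B's
-- ceiling division raises for cap = 0).
def Pre_solution (cap : Int) (n : Int) (deliveries : List Int) (pickups : List Int) : Prop :=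
  n ≤ 0 ∨ (1 ≤ cap ∧ 0 ≤ n ∧ n ≤ deliveries.length ∧ n ≤ pickups.length)
instance (cap : Int) (n : Int) (deliveries : List Int) (pickups : List Int) : Decidable (Pre_solution cap n deliveries pickups) := by unfold Pre_solution; infer_instance

def pvWitness_solution : Int × Int × List Int × List Int := (4, 2, [1, 0], [0, 3])

def Spec_solution (cap : Int) (n : Int) (deliveries : List Int) (pickups : List Int) (out : Int) : Prop := out = solution_alt cap n deliveries pickups
instance (cap : Int) (n : Int) (deliveries : List Int) (pickups : List Int) (out : Int) : Decidable (Spec_solution cap n deliveries pickups out) := by unfold Spec_solution; infer_instance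

-- ===== CLAIM (what is proved, stated in full; the proofs are below) =====
def Claim_equal_solution : Prop := ∀ (cap : Int) (n : Int) (deliveries : List Int) (pickups : List Int), Dom_solution cap n deliveries pickups → Pre_solution cap n deliveries pickups → Spec_solution cap n deliveries pickups (solution cap n deliveries pickups)

-- ===== LEMMAS AND PROOFS =====

-- ceiling division ⌈a / b⌉ for b > 0, as B computes it
def cdiv (a b : Int) : Int := -(PySem.Int.floordiv (-a) b)

-- farthest position of a stack (stacks are kept top-first, positions strictly decreasing)
def headPos : List (Int × Int) → Int
  | [] => 0
  | pb :: _ => pb.1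

-- total boxes at positions ≥ j
def sfx (j : Int) (st : List (Int × Int)) : Int :=
  (st.map (fun pb => if j ≤ pb.1 then pb.2 else 0)).sum

-- maximum prefix sum of the boxes taken top-first, restricted to positions ≥ j
-- (the greedy loader's running load peaks; 0 when no position reaches j)
def Gex (j : Int) : List (Int × Int) → Int
  | [] => 0
  | (p, b) :: rest => if j ≤ p then b + max 0 (Gex j rest) else 0

-- number of truck visits house j still receives from stack st
def cnt (cap j : Int) (st : List (Int × Int)) : Int :=
  (if j ≤ headPos st then 1 else 0) + max 0 (cdiv (max 0 (Gex j st)) cap - 1)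

-- stack invariant: strictly decreasing positions, all in [1, N]
def StInv (N : Nat) (st : List (Int × Int)) : Prop :=
  st.Pairwise (fun a b => b.1 < a.1) ∧ ∀ pb ∈ st, 1 ≤ pb.1 ∧ pb.1 ≤ (N : Int)

-- suffix sum of the first k entries of xs from index i
def Ssuf (xs : List Int) (i k : Nat) : Int :=
  ∑ m ∈ Finset.range k, (if i ≤ m then pvGet xs (m : Int) else 0)

-- B's loop state after processing the window [N-c, N): (suffix sum, running max, nonzero seen)
def wSt (xs : List Int) (N : Nat) : Nat → Int × Int × Bool
  | 0 => (0, 0, false)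
  | c + 1 =>
    let prev := wSt xs N c
    let idx : Int := ((N - (c + 1) : Nat) : Int)
    let s := prev.1 + pvGet xs idx
    (s, (if prev.2.1 < s then s else prev.2.1), (prev.2.2 || decide (pvGet xs idx ≠ 0)))

theorem cdiv_bounds (a b : Int) (hb : 0 < b) :
    (cdiv a b - 1) * b < a ∧ a ≤ cdiv a b * b :=
  (PySem.Int.neg_floordiv_neg_eq_iff_of_pos (a := a) (b := b) (q := cdiv a b) hb).mp rfl

theorem cdiv_eq (a b k : Int) (hb : 0 < b) (h1 : (k - 1) * b < a) (h2 : a ≤ k * b) :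
    cdiv a b = k :=
  (PySem.Int.neg_floordiv_neg_eq_iff_of_pos hb).mpr ⟨h1, h2⟩

theorem cdiv_zero (b : Int) (hb : 0 < b) : cdiv 0 b = 0 :=
  cdiv_eq 0 b 0 hb (by simpa using hb) (by simp)

theorem cdiv_le_one (a b : Int) (hb : 0 < b) (h1 : 0 ≤ a) (h2 : a ≤ b) : cdiv a b ≤ 1 := by
  rcases cdiv_bounds a b hb with ⟨hl, _⟩
  by_contra hgt
  push_neg at hgt
  nlinarith

theorem cdiv_ge_two (a b : Int) (hb : 0 < b) (h : b < a) : 2 ≤ cdiv a b := by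
  rcases cdiv_bounds a b hb with ⟨_, hr⟩
  by_contra hlt
  push_neg at hlt
  nlinarith

theorem cdiv_sub (a b : Int) (hb : 0 < b) (h : b < a) : cdiv (a - b) b = cdiv a b - 1 := by
  rcases cdiv_bounds a b hb with ⟨hl, hr⟩
  refine cdiv_eq _ _ _ hb (by nlinarith) (by nlinarith)

theorem sfx_zero_of_lt (j : Int) (st : List (Int × Int)) (h : ∀ pb ∈ st, pb.1 < j) :
    sfx j st = 0 := by
  induction st with
  | nil => simp [sfx]
  | cons a l ih =>
    have ha := h a (by simp)
    have hl := ih (fun pb hpb => h pb (by simp [hpb]))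
    simp only [sfx, List.map_cons, List.sum_cons] at *
    rw [if_neg (by omega), hl]
    omega

theorem headPos_nonneg (N : Nat) (st : List (Int × Int)) (hInv : StInv N st) :
    0 ≤ headPos st ∧ headPos st ≤ (N : Int) := by
  cases st with
  | nil => simp [headPos]
  | cons a l =>
    have := hInv.2 a (by simp)
    simp only [headPos]
    omega

theorem Gex_zero_of_head (j : Int) (st : List (Int × Int)) (h : headPos st < j) :
    Gex j st = 0 := by
  cases st with
  | nil => rfl
  | cons a l =>
    obtain ⟨p, b⟩ := a
    simp only [headPos] at h
    simp only [Gex]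
    rw [if_neg (by omega)]

theorem head_ge_iff (j : Int) (st : List (Int × Int))
    (hpw : st.Pairwise (fun a b => b.1 < a.1)) (hj : 1 ≤ j) :
    j ≤ headPos st ↔ ∃ pb ∈ st, j ≤ pb.1 := by
  cases st with
  | nil => simp [headPos]; omega
  | cons a l =>
    rw [List.pairwise_cons] at hpw
    simp only [headPos]
    constructor
    · intro h; exact ⟨a, by simp, h⟩
    · rintro ⟨pb, hpb, hle⟩
      rcases List.mem_cons.mp hpb with rfl | hpb
      · exact hle
      · have := hpw.1 pb hpb
        omega

-- the first component of f: the farthest (= topmost) remaining position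
theorem fA_fst (cap : Int) : ∀ (st : List (Int × Int)) (tmp maxd : Int),
    st.Pairwise (fun a b => b.1 < a.1) → (∀ pb ∈ st, 1 ≤ pb.1) → 0 ≤ maxd →
    (fA cap st tmp maxd).1 = max (headPos st) maxd := by
  intro st
  induction st with
  | nil => intro tmp maxd _ _ h; simp [fA, headPos]; omega
  | cons a l ih =>
    intro tmp maxd hpw hpos hmd
    obtain ⟨dis, box⟩ := a
    rw [List.pairwise_cons] at hpw
    simp only [fA, headPos]
    split_ifs with h
    · rfl
    · rw [ih (tmp + box) (max dis maxd) hpw.2 (fun pb hpb => hpos pb (by simp [hpb]))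
        (by have := hpos (dis, box) (by simp); omega)]
      cases l with
      | nil =>
        have := hpos (dis, box) (by simp)
        simp only [headPos]; omega
      | cons b m =>
        have hb := hpw.1 b (by simp)
        simp only [headPos]
        omega

-- core characterisation of one trip: where the new top lands and the new load peaks
theorem fA_res (cap : Int) : ∀ (st : List (Int × Int)) (tmp maxd j : Int),
    st.Pairwise (fun a b => b.1 < a.1) → tmp ≤ cap → 1 ≤ j →
    ((j ≤ headPos (fA cap st tmp maxd).2) ↔ cap < tmp + Gex j st) ∧
    max 0 (Gex j (fA cap st tmp maxd).2) = max 0 (tmp + Gex j st - cap) := by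
  intro st
  induction st with
  | nil =>
    intro tmp maxd j _ htmp hj
    simp only [fA, headPos, Gex]
    constructor
    · omega
    · omega
  | cons a l ih =>
    intro tmp maxd j hpw htmp hj
    obtain ⟨p, b⟩ := a
    rw [List.pairwise_cons] at hpw
    simp only [fA]
    split_ifs with hbr
    · -- break: leftover (p, tmp+b-cap) is pushed back
      by_cases hjp : j ≤ p
      · constructor
        · simp only [headPos, Gex, if_pos hjp]
          have : 0 ≤ max 0 (Gex j l) := le_max_left 0 _
          constructor
          · intro _; omega
          · intro _; exact hjp
        · simp only [Gex, if_pos hjp]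
          omega
      · constructor
        · simp only [headPos, Gex, if_neg hjp]
          omega
        · simp only [Gex, if_neg hjp]
          omega
    · -- no break: item consumed, recurse with tmp + b
      push_neg at hbr
      have hres := ih (tmp + b) (max p maxd) j hpw.2 hbr hj
      by_cases hjp : j ≤ p
      · have hGst : Gex j ((p, b) :: l) = b + max 0 (Gex j l) := by
          simp only [Gex, if_pos hjp]
        rw [hGst]
        constructor
        · rw [hres.1]
          constructor
          · intro h
            have h0 : 0 ≤ max 0 (Gex j l) := le_max_left 0 _
            have hle : Gex j l ≤ max 0 (Gex j l) := le_max_right 0 _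
            omega
          · intro h
            -- tmp + b + max 0 (Gex j l) > cap with tmp + b ≤ cap forces Gex j l > 0
            have hpos : 0 < Gex j l := by
              by_contra hne
              push_neg at hne
              have : max 0 (Gex j l) = 0 := by omega
              omega
            have : max 0 (Gex j l) = Gex j l := by omega
            omega
        · rw [hres.2]
          have hle : Gex j l ≤ max 0 (Gex j l) := le_max_right 0 _
          have h0 : 0 ≤ max 0 (Gex j l) := le_max_left 0 _
          by_cases hpos : 0 < Gex j l
          · have : max 0 (Gex j l) = Gex j l := by omega
            omega
          · push_neg at hpos
            have : max 0 (Gex j l) = 0 := by omega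
            omega
      · -- j beyond the top position: everything below is even nearer
        have hheadl : headPos l < j := by
          cases l with
          | nil => simp only [headPos]; omega
          | cons c m =>
            have := hpw.1 c (by simp)
            simp only [headPos]
            omega
        have hGl : Gex j l = 0 := Gex_zero_of_head j l hheadl
        have hGst : Gex j ((p, b) :: l) = 0 := by
          simp only [Gex, if_neg hjp]
        rw [hGst]
        rw [hGl] at hres
        constructor
        · rw [hres.1]; omega
        · rw [hres.2]; omega

theorem fA_len (cap : Int) : ∀ (st : List (Int × Int)) (tmp maxd : Int),
    (fA cap st tmp maxd).2.length ≤ st.length := by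
  intro st
  induction st with
  | nil => intro tmp maxd; simp [fA]
  | cons a l ih =>
    intro tmp maxd
    obtain ⟨p, b⟩ := a
    simp only [fA]
    split_ifs with h
    · simp
    · have := ih (tmp + b) (max p maxd)
      simp only [List.length_cons]
      omega

theorem fA_inv (cap : Int) (N : Nat) : ∀ (st : List (Int × Int)) (tmp maxd : Int),
    StInv N st → StInv N (fA cap st tmp maxd).2 := by
  intro st
  induction st with
  | nil => intro tmp maxd _; exact ⟨by simp [fA], by simp [fA]⟩
  | cons a l ih =>
    intro tmp maxd hInv
    obtain ⟨p, b⟩ := a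
    obtain ⟨hpw, hmem⟩ := hInv
    rw [List.pairwise_cons] at hpw
    simp only [fA]
    split_ifs with h
    · refine ⟨List.pairwise_cons.mpr ⟨fun pb hpb => hpw.1 pb hpb, hpw.2⟩, ?_⟩
      intro pb hpb
      rcases List.mem_cons.mp hpb with rfl | hpb
      · exact hmem (p, b) (by simp)
      · exact hmem pb (by simp [hpb])
    · exact ih (tmp + b) (max p maxd) ⟨hpw.2, fun pb hpb => hmem pb (by simp [hpb])⟩

-- one outer iteration decrements every house's pending visit count (floored at 0)
theorem cnt_step (cap : Int) (hc : 1 ≤ cap) (st : List (Int × Int)) (j : Int)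
    (hpw : st.Pairwise (fun a b => b.1 < a.1)) (hj : 1 ≤ j) :
    cnt cap j (fA cap st 0 0).2 = max 0 (cnt cap j st - 1) := by
  have hres := fA_res cap st 0 0 j hpw (by omega) hj
  rw [zero_add] at hres
  unfold cnt
  by_cases hbig : cap < Gex j st
  · -- the trip breaks within reach of house j: flag stays, peak drops by cap
    have hG : max 0 (Gex j st) = Gex j st := by omega
    have hflag : j ≤ headPos st := by
      by_contra hno
      push_neg at hno
      rw [Gex_zero_of_head j st hno] at hbig
      omega
    have h2 : 2 ≤ cdiv (Gex j st) cap := cdiv_ge_two _ _ (by omega) hbig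
    have hsub : cdiv (Gex j st - cap) cap = cdiv (Gex j st) cap - 1 :=
      cdiv_sub _ _ (by omega) hbig
    rw [if_pos (hres.1.mpr hbig), if_pos hflag, hres.2, hG]
    have hmax : max 0 (Gex j st - cap) = Gex j st - cap := by omega
    rw [hmax, hsub]
    omega
  · -- at most one more visit pending for house j
    push_neg at hbig
    have hflag' : ¬ (j ≤ headPos (fA cap st 0 0).2) := fun h => by
      have := hres.1.mp h; omega
    have hG' : max 0 (Gex j (fA cap st 0 0).2) = 0 := by
      rw [hres.2]; omega
    have hGmax : 0 ≤ max 0 (Gex j st) ∧ max 0 (Gex j st) ≤ cap := by omega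
    have hle1 : cdiv (max 0 (Gex j st)) cap ≤ 1 :=
      cdiv_le_one _ _ (by omega) hGmax.1 hGmax.2
    rw [if_neg hflag', hG', cdiv_zero cap (by omega)]
    split_ifs with hflag
    · omega
    · rw [Gex_zero_of_head j st (by omega)]
      rw [show max (0:Int) 0 = 0 from max_self 0, cdiv_zero cap (by omega)]
      omega

theorem cnt_nonneg (cap j : Int) (st : List (Int × Int)) : 0 ≤ cnt cap j st := by
  unfold cnt
  have := le_max_left 0 (cdiv (max 0 (Gex j st)) cap - 1)
  split_ifs <;> omega

theorem cnt_pos_iff (cap : Int) (hc : 1 ≤ cap) (j : Int) (st : List (Int × Int)) :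
    1 ≤ cnt cap j st ↔ j ≤ headPos st := by
  unfold cnt
  constructor
  · intro h
    by_contra hno
    push_neg at hno
    rw [if_neg (by omega), Gex_zero_of_head j st hno] at h
    rw [show max (0:Int) 0 = 0 by omega, cdiv_zero cap (by omega)] at h
    omega
  · intro h
    rw [if_pos h]
    have := le_max_left 0 (cdiv (max 0 (Gex j st)) cap - 1)
    omega

theorem count_lemma : ∀ (N : Nat) (m : Int), 0 ≤ m → m ≤ (N : Int) →
    ∑ i ∈ Finset.range N, (if (i : Int) + 1 ≤ m then (1 : Int) else 0) = m := by
  intro N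
  induction N with
  | zero => intro m h1 h2; simp at *; omega
  | succ N ih =>
    intro m h1 h2
    rw [Finset.sum_range_succ]
    by_cases hm : m ≤ (N : Int)
    · rw [ih m h1 hm, if_neg (by push_cast; omega)]
      omega
    · push_neg at hm
      have hall : ∀ i ∈ Finset.range N, (if (i : Int) + 1 ≤ m then (1 : Int) else 0) = 1 := by
        intro i hi
        have : i < N := Finset.mem_range.mp hi
        rw [if_pos (by push_cast; omega)]
      rw [Finset.sum_congr rfl hall, Finset.sum_const, Finset.card_range,
        if_pos (by push_cast; omega), nsmul_eq_mul]
      push_cast at h2 ⊢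
      omega

-- termination bookkeeping: the peak is bounded by the total absolute load
theorem Gex_le_abs (j : Int) : ∀ st : List (Int × Int),
    Gex j st ≤ (st.map (fun pb => (pb.2.natAbs : Int))).sum := by
  intro st
  induction st with
  | nil => simp [Gex]
  | cons a l ih =>
    obtain ⟨p, b⟩ := a
    have h0 : 0 ≤ (l.map (fun pb => (pb.2.natAbs : Int))).sum := by
      refine List.sum_nonneg ?_
      intro x hx
      obtain ⟨pb, _, rfl⟩ := List.mem_map.mp hx
      positivity
    simp only [Gex, List.map_cons, List.sum_cons]
    split_ifs with h
    · have hb : b ≤ (b.natAbs : Int) := Int.le_natAbs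
      omega
    · have hb : (0:Int) ≤ (b.natAbs : Int) := by positivity
      omega

theorem absSum_cast (st : List (Int × Int)) :
    (((st.map (fun pb => pb.2.natAbs + 1)).sum : Nat) : Int)
      = (st.map (fun pb => (pb.2.natAbs : Int))).sum + st.length := by
  induction st with
  | nil => simp
  | cons a l ih =>
    simp only [List.map_cons, List.sum_cons, List.length_cons]
    push_cast at ih ⊢
    omega

-- the fuel potential: remaining peak plus stack length
def phi (st : List (Int × Int)) : Nat := (max 0 (Gex 1 st)).toNat + st.length

theorem phi_decr (cap : Int) (hc : 1 ≤ cap) (N : Nat) (st : List (Int × Int))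
    (hInv : StInv N st) :
    phi (fA cap st 0 0).2 ≤ phi st ∧ (st ≠ [] → phi (fA cap st 0 0).2 < phi st) := by
  have hres := fA_res cap st 0 0 1 hInv.1 (by omega) le_rfl
  rw [zero_add] at hres
  have hlen := fA_len cap st 0 0
  by_cases hbig : cap < Gex 1 st
  · have : max 0 (Gex 1 (fA cap st 0 0).2) = Gex 1 st - cap := by
      rw [hres.2]; omega
    unfold phi
    constructor
    · omega
    · intro _; omega
  · push_neg at hbig
    have hempty : (fA cap st 0 0).2 = [] := by
      have hInv' := fA_inv cap N st 0 0 hInv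
      cases hres' : (fA cap st 0 0).2 with
      | nil => rfl
      | cons a l =>
        exfalso
        have hhead : 1 ≤ headPos ((a :: l)) := by
          have := hInv'.2 a (by rw [hres']; simp)
          simp only [headPos]
          omega
        rw [hres'] at hres
        have := hres.1.mp hhead
        omega
    rw [hempty]
    have hres0 : phi ([] : List (Int × Int)) = 0 := by simp [phi, Gex]
    rw [hres0]
    constructor
    · exact Nat.zero_le _
    · intro hne
      have : 1 ≤ st.length := by
        cases st with
        | nil => exact absurd rfl hne
        | cons a l => simp
      unfold phi
      omega

-- main loop invariant of A: each iteration adds 2·(farthest pending house of either kind)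
theorem outer_spec (cap : Int) (hc : 1 ≤ cap) (N : Nat) :
    ∀ (fuel : Nat) (sd sp : List (Int × Int)) (ans : Int), StInv N sd → StInv N sp →
    phi sd + phi sp < fuel →
    outerA cap fuel sd sp ans =
      ans + ∑ i ∈ Finset.range N,
        2 * max (cnt cap ((i : Int) + 1) sd) (cnt cap ((i : Int) + 1) sp) := by
  intro fuel
  induction fuel with
  | zero => intro sd sp ans _ _ hfuel; omega
  | succ fuel ih =>
    intro sd sp ans hd hp hfuel
    simp only [outerA]
    split_ifs with hemp
    · obtain ⟨rfl, rfl⟩ := hemp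
      have hterm : ∀ i ∈ Finset.range N,
          2 * max (cnt cap ((i : Int) + 1) ([] : List (Int × Int)))
            (cnt cap ((i : Int) + 1) ([] : List (Int × Int))) = 0 := by
        intro i _
        have h0 : cnt cap ((i : Int) + 1) ([] : List (Int × Int)) = 0 := by
          unfold cnt
          rw [if_neg (by simp only [headPos]; omega)]
          simp only [Gex]
          rw [show max (0:Int) 0 = 0 by omega, cdiv_zero cap (by omega)]
          omega
        rw [h0]
        omega
      rw [Finset.sum_congr rfl hterm]
      simp
    · have hdpos : ∀ pb ∈ sd, 1 ≤ pb.1 := fun pb hpb => (hd.2 pb hpb).1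
      have hppos : ∀ pb ∈ sp, 1 ≤ pb.1 := fun pb hpb => (hp.2 pb hpb).1
      have hhd := headPos_nonneg N sd hd
      have hhp := headPos_nonneg N sp hp
      have hfd : (fA cap sd 0 0).1 = headPos sd := by
        rw [fA_fst cap sd 0 0 hd.1 hdpos le_rfl]; omega
      have hfp : (fA cap sp 0 0).1 = headPos sp := by
        rw [fA_fst cap sp 0 0 hp.1 hppos le_rfl]; omega
      have hd' := fA_inv cap N sd 0 0 hd
      have hp' := fA_inv cap N sp 0 0 hp
      have hphid := phi_decr cap hc N sd hd
      have hphip := phi_decr cap hc N sp hp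
      have hfuel' : phi (fA cap sd 0 0).2 + phi (fA cap sp 0 0).2 < fuel := by
        by_cases hsd0 : sd = []
        · have hsp0 : sp ≠ [] := fun h => hemp ⟨hsd0, h⟩
          have := hphip.2 hsp0
          omega
        · have := hphid.2 hsd0
          omega
      rw [ih (fA cap sd 0 0).2 (fA cap sp 0 0).2 _ hd' hp' hfuel']
      have hterm : ∀ i ∈ Finset.range N,
          2 * max (cnt cap ((i : Int) + 1) (fA cap sd 0 0).2)
              (cnt cap ((i : Int) + 1) (fA cap sp 0 0).2) =
            2 * max (cnt cap ((i : Int) + 1) sd) (cnt cap ((i : Int) + 1) sp)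
              - 2 * (if (i : Int) + 1 ≤ max (headPos sd) (headPos sp) then (1 : Int) else 0) := by
        intro i _
        rw [cnt_step cap hc sd _ hd.1 (by omega), cnt_step cap hc sp _ hp.1 (by omega)]
        have had := cnt_nonneg cap ((i : Int) + 1) sd
        have hap := cnt_nonneg cap ((i : Int) + 1) sp
        have hidd := cnt_pos_iff cap hc ((i : Int) + 1) sd
        have hidp := cnt_pos_iff cap hc ((i : Int) + 1) sp
        by_cases hcond : (i : Int) + 1 ≤ max (headPos sd) (headPos sp)
        · rw [if_pos hcond]
          have : 1 ≤ cnt cap ((i : Int) + 1) sd ∨ 1 ≤ cnt cap ((i : Int) + 1) sp := by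
            rcases max_cases (headPos sd) (headPos sp) with ⟨he, _⟩ | ⟨he, _⟩
            · left; exact hidd.mpr (by omega)
            · right; exact hidp.mpr (by omega)
          omega
        · rw [if_neg hcond]
          have h1 : ¬ 1 ≤ cnt cap ((i : Int) + 1) sd := fun h => by
            have := hidd.mp h; omega
          have h2 : ¬ 1 ≤ cnt cap ((i : Int) + 1) sp := fun h => by
            have := hidp.mp h; omega
          omega
      have hcnt : ∑ x ∈ Finset.range N,
          (2 : Int) * (if (x : Int) + 1 ≤ max (headPos sd) (headPos sp) then (1 : Int) else 0) =
            2 * max (headPos sd) (headPos sp) := by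
        rw [← Finset.mul_sum,
          count_lemma N (max (headPos sd) (headPos sp)) (by omega) (by omega)]
      rw [Finset.sum_congr rfl hterm, Finset.sum_sub_distrib, hcnt, hfd, hfp]
      ring

-- relating the initial stacks to the arrays ---------------------------------------

theorem sfx_filterMap (xs : List Int) (j : Int) : ∀ l : List Int,
    sfx j (l.filterMap (fun i => if pvGet xs i ≠ 0 then some (i + 1, pvGet xs i) else none)) =
      (l.map (fun i => if j ≤ i + 1 then pvGet xs i else 0)).sum := by
  intro l
  induction l with
  | nil => simp [sfx]
  | cons a l ih =>
    rw [List.filterMap_cons]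
    by_cases h : pvGet xs a = 0
    · simp only [h, ne_eq, not_true_eq_false, if_neg, List.map_cons, List.sum_cons]
      rw [if_neg (by simp [h])]
      simp only [ih]
      split_ifs <;> simp [h]
    · rw [if_pos (by simp [h])]
      simp only [sfx, List.map_cons, List.sum_cons] at *
      rw [ih]

theorem list_sum_range (K : Nat) (f : Nat → Int) :
    ((List.range K).map f).sum = ∑ k ∈ Finset.range K, f k := by
  induction K with
  | zero => simp
  | succ K ih => rw [List.range_succ, Finset.sum_range_succ, List.map_append, List.sum_append, ih]; simp

theorem sfx_reverse (j : Int) (st : List (Int × Int)) : sfx j st.reverse = sfx j st := by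
  simp [sfx, List.map_reverse]

theorem sfx_mkHome (xs : List Int) (n : Int) (i : Nat) :
    sfx ((i : Int) + 1) ((mkHome xs n).reverse) = Ssuf xs i n.toNat := by
  rw [sfx_reverse]
  unfold mkHome
  rw [sfx_filterMap, PySem.List.pyRange_one]
  simp only [sub_zero, zero_add, List.map_map, Function.comp_def]
  rw [list_sum_range n.toNat (fun k => if (i : Int) + 1 ≤ (k : Int) + 1 then pvGet xs (k : Int) else 0)]
  unfold Ssuf
  refine Finset.sum_congr rfl ?_
  intro m _
  by_cases h : i ≤ m
  · rw [if_pos (by push_cast; omega), if_pos h]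
  · rw [if_neg (by push_cast; omega), if_neg h]

theorem inv_mkHome (xs : List Int) (n : Int) : StInv n.toNat ((mkHome xs n).reverse) := by
  constructor
  · rw [List.pairwise_reverse]
    unfold mkHome
    refine List.Pairwise.filterMap _ ?_ (PySem.List.pairwise_lt_pyRange_one 0 n)
    have hkey : ∀ (i : Int) (c : Int × Int),
        (if pvGet xs i ≠ 0 then some (i + 1, pvGet xs i) else none) = some c → c.1 = i + 1 := by
      intro i c h
      split_ifs at h
      cases h
      rfl
    intro a b hab c hc d hd
    have h1 := hkey a c hc
    have h2 := hkey b d hd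
    omega
  · intro pb hpb
    rw [List.mem_reverse] at hpb
    unfold mkHome at hpb
    rw [List.mem_filterMap] at hpb
    obtain ⟨a, ha, hfa⟩ := hpb
    rw [PySem.List.mem_pyRange_one] at ha
    split_ifs at hfa
    cases hfa
    simp only
    omega

theorem mem_mkHome_iff (xs : List Int) (n : Int) (j : Int) (hj : 1 ≤ j) :
    (∃ pb ∈ (mkHome xs n).reverse, j ≤ pb.1) ↔
      (∃ a : Int, 0 ≤ a ∧ a < n ∧ j ≤ a + 1 ∧ pvGet xs a ≠ 0) := by
  constructor
  · rintro ⟨pb, hpb, hle⟩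
    rw [List.mem_reverse] at hpb
    unfold mkHome at hpb
    rw [List.mem_filterMap] at hpb
    obtain ⟨a, ha, hfa⟩ := hpb
    rw [PySem.List.mem_pyRange_one] at ha
    split_ifs at hfa with hne
    cases hfa
    exact ⟨a, by omega, by omega, by simpa using hle, hne⟩
  · rintro ⟨a, h0, hn, hja, hne⟩
    refine ⟨(a + 1, pvGet xs a), ?_, by simpa using hja⟩
    rw [List.mem_reverse]
    unfold mkHome
    rw [List.mem_filterMap]
    exact ⟨a, by rw [PySem.List.mem_pyRange_one]; omega, by rw [if_pos hne]⟩

-- the stack's clipped peak obeys the same downward recursion as B's running maximum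
theorem Gmax_succ (j : Int) (hj : 1 ≤ j) : ∀ st : List (Int × Int),
    st.Pairwise (fun a b => b.1 < a.1) →
    max 0 (Gex j st) = max (max 0 (Gex (j + 1) st)) (sfx j st) := by
  intro st
  induction st with
  | nil => simp [Gex, sfx]
  | cons a l ih =>
    intro hpw
    rw [List.pairwise_cons] at hpw
    obtain ⟨p, b⟩ := a
    have hrest : ∀ pb ∈ l, pb.1 < p := hpw.1
    by_cases hjp : j ≤ p
    · by_cases hjp1 : j + 1 ≤ p
      · -- p > j: the item survives both thresholds
        have hIH := ih hpw.2
        simp only [Gex, sfx, List.map_cons, List.sum_cons, if_pos hjp, if_pos hjp1]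
        simp only [sfx] at hIH
        omega
      · -- p = j: the whole-stack sum is the only new prefix
        have hGl : Gex j l = 0 := by
          refine Gex_zero_of_head j l ?_
          cases l with
          | nil => simp only [headPos]; omega
          | cons c m => have := hrest c (by simp); simp only [headPos]; omega
        have hsl : sfx j l = 0 := sfx_zero_of_lt j l (fun pb hpb => by
          have := hrest pb hpb; omega)
        have hG1 : Gex (j + 1) ((p, b) :: l) = 0 :=
          Gex_zero_of_head (j + 1) ((p, b) :: l) (by simp only [headPos]; omega)
        rw [hG1]
        simp only [Gex, sfx, List.map_cons, List.sum_cons, if_pos hjp]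
        simp only [sfx] at hsl
        rw [hGl, hsl]
        omega
    · -- j above the top: nothing on either side
      have hsl : sfx j ((p, b) :: l) = 0 := sfx_zero_of_lt j _ (fun pb hpb => by
        rcases List.mem_cons.mp hpb with rfl | hpb
        · omega
        · have := hrest pb hpb; omega)
      simp only [sfx, List.map_cons, List.sum_cons, if_neg hjp] at hsl
      simp only [Gex, sfx, List.map_cons, List.sum_cons, if_neg hjp,
        if_neg (by omega : ¬ (j + 1 ≤ p))]
      omega

theorem Ssuf_step (xs : List Int) (i k : Nat) (h : i < k) :
    Ssuf xs i k = pvGet xs (i : Int) + Ssuf xs (i + 1) k := by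
  unfold Ssuf
  have hsplit : ∀ m ∈ Finset.range k,
      (if i ≤ m then pvGet xs (m : Int) else 0)
        = (if m = i then pvGet xs (m : Int) else 0) + (if i + 1 ≤ m then pvGet xs (m : Int) else 0) := by
    intro m _
    by_cases h1 : m = i
    · subst h1; rw [if_pos le_rfl, if_pos rfl, if_neg (by omega)]; omega
    · by_cases h2 : i ≤ m
      · rw [if_pos h2, if_neg h1, if_pos (by omega)]; omega
      · rw [if_neg h2, if_neg h1, if_neg (by omega)]; omega
  rw [Finset.sum_congr rfl hsplit, Finset.sum_add_distrib]
  congr 1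
  rw [Finset.sum_ite_eq' (Finset.range k) i (fun m => pvGet xs (m : Int))]
  rw [if_pos (Finset.mem_range.mpr h)]

theorem Ssuf_top (xs : List Int) (k : Nat) : Ssuf xs k k = 0 := by
  unfold Ssuf
  refine Finset.sum_eq_zero ?_
  intro m hm
  rw [if_neg (by have := Finset.mem_range.mp hm; omega)]

-- B's running state over the window [N-c, N) in terms of the initial stack
theorem wSt_spec (xs : List Int) (n : Int) : ∀ c : Nat, c ≤ n.toNat →
    (wSt xs n.toNat c).1 = Ssuf xs (n.toNat - c) n.toNat
    ∧ (wSt xs n.toNat c).2.1 = max 0 (Gex (((n.toNat - c : Nat) : Int) + 1) ((mkHome xs n).reverse))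
    ∧ ((wSt xs n.toNat c).2.2 = true ↔
        ((n.toNat - c : Nat) : Int) + 1 ≤ headPos ((mkHome xs n).reverse)) := by
  intro c
  induction c with
  | zero =>
    intro _
    refine ⟨by simp [wSt, Ssuf_top], ?_, ?_⟩
    · have hhead := headPos_nonneg n.toNat _ (inv_mkHome xs n)
      rw [Gex_zero_of_head _ _ (by omega)]
      simp [wSt]
    · have hhead := headPos_nonneg n.toNat _ (inv_mkHome xs n)
      simp only [wSt]
      constructor
      · intro h; cases h
      · intro h; omega
  | succ c ih =>
    intro hc
    have hc' : c ≤ n.toNat := by omega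
    obtain ⟨ihs, ihm, ihf⟩ := ih hc'
    have hstep : n.toNat - c = (n.toNat - (c + 1)) + 1 := by omega
    have hpw := (inv_mkHome xs n).1
    have hs : (wSt xs n.toNat c).1 + pvGet xs ((n.toNat - (c + 1) : Nat) : Int)
        = Ssuf xs (n.toNat - (c + 1)) n.toNat := by
      rw [ihs, hstep, Ssuf_step xs (n.toNat - (c + 1)) n.toNat (by omega)]
      omega
    refine ⟨hs, ?_, ?_⟩
    · -- running maximum
      show (if (wSt xs n.toNat c).2.1 < (wSt xs n.toNat c).1 + pvGet xs ((n.toNat - (c + 1) : Nat) : Int)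
          then (wSt xs n.toNat c).1 + pvGet xs ((n.toNat - (c + 1) : Nat) : Int)
          else (wSt xs n.toNat c).2.1)
        = max 0 (Gex (((n.toNat - (c + 1) : Nat) : Int) + 1) ((mkHome xs n).reverse))
      have hG := Gmax_succ (((n.toNat - (c + 1) : Nat) : Int) + 1) (by omega)
        ((mkHome xs n).reverse) hpw
      have hsfx := sfx_mkHome xs n (n.toNat - (c + 1))
      have hcast : ((n.toNat - c : Nat) : Int) + 1
          = (((n.toNat - (c + 1) : Nat) : Int) + 1) + 1 := by omega
      rw [hcast] at ihm
      rw [hs, ihm, hG, hsfx]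
      omega
    · -- nonzero-seen flag
      show ((wSt xs n.toNat c).2.2 || decide (pvGet xs ((n.toNat - (c + 1) : Nat) : Int) ≠ 0)) = true ↔
        ((n.toNat - (c + 1) : Nat) : Int) + 1 ≤ headPos ((mkHome xs n).reverse)
      have hcast : ((n.toNat - c : Nat) : Int) = ((n.toNat - (c + 1) : Nat) : Int) + 1 := by omega
      rw [Bool.or_eq_true, decide_eq_true_iff, ihf, hcast]
      rw [head_ge_iff _ _ hpw (by omega), head_ge_iff _ _ hpw (by omega)]
      rw [mem_mkHome_iff xs n _ (by omega), mem_mkHome_iff xs n _ (by omega)]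
      have hin : ((n.toNat - (c + 1) : Nat) : Int) < n := by omega
      constructor
      · rintro (⟨a, h1, h2, h3, h4⟩ | hnz)
        · exact ⟨a, h1, h2, by omega, h4⟩
        · exact ⟨((n.toNat - (c + 1) : Nat) : Int), by omega, hin, by omega, hnz⟩
      · rintro ⟨a, h1, h2, h3, h4⟩
        by_cases hai : a = ((n.toNat - (c + 1) : Nat) : Int)
        · right; rw [← hai]; exact h4
        · left; exact ⟨a, h1, h2, by omega, h4⟩

-- B's loop unrolled against its state invariant
theorem altGo_inv (cap : Int) (ds ps : List Int) :
    ∀ (k N : Nat), k ≤ N → ∀ ans : Int,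
    altGo cap ds ps k (wSt ds N (N - k)).1 (wSt ds N (N - k)).2.1 (wSt ds N (N - k)).2.2
      (wSt ps N (N - k)).1 (wSt ps N (N - k)).2.1 (wSt ps N (N - k)).2.2 ans =
      ans + ∑ i ∈ Finset.range k,
        2 * max ((if (wSt ds N (N - i)).2.2 then (1 : Int) else 0)
              + max 0 (cdiv (wSt ds N (N - i)).2.1 cap - 1))
          ((if (wSt ps N (N - i)).2.2 then (1 : Int) else 0)
              + max 0 (cdiv (wSt ps N (N - i)).2.1 cap - 1)) := by
  intro k
  induction k with
  | zero => intro N _ ans; simp [altGo]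
  | succ k ih =>
    intro N hk ans
    have hk' : k ≤ N := by omega
    have hstep : N - k = (N - (k + 1)) + 1 := by omega
    have hidx : ((N - ((N - (k + 1)) + 1) : Nat) : Int) = (k : Int) := by omega
    have h1d : (wSt ds N (N - (k + 1))).1 + pvGet ds (k : Int) = (wSt ds N (N - k)).1 := by
      rw [hstep]; simp only [wSt]; rw [hidx]
    have h2d : (if (wSt ds N (N - (k + 1))).2.1 < (wSt ds N (N - (k + 1))).1 + pvGet ds (k : Int)
          then (wSt ds N (N - (k + 1))).1 + pvGet ds (k : Int)
          else (wSt ds N (N - (k + 1))).2.1) = (wSt ds N (N - k)).2.1 := by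
      rw [hstep]; simp only [wSt]; rw [hidx]
    have h3d : ((wSt ds N (N - (k + 1))).2.2 || decide (pvGet ds (k : Int) ≠ 0))
        = (wSt ds N (N - k)).2.2 := by
      rw [hstep]; simp only [wSt]; rw [hidx]
    have h1p : (wSt ps N (N - (k + 1))).1 + pvGet ps (k : Int) = (wSt ps N (N - k)).1 := by
      rw [hstep]; simp only [wSt]; rw [hidx]
    have h2p : (if (wSt ps N (N - (k + 1))).2.1 < (wSt ps N (N - (k + 1))).1 + pvGet ps (k : Int)
          then (wSt ps N (N - (k + 1))).1 + pvGet ps (k : Int)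
          else (wSt ps N (N - (k + 1))).2.1) = (wSt ps N (N - k)).2.1 := by
      rw [hstep]; simp only [wSt]; rw [hidx]
    have h3p : ((wSt ps N (N - (k + 1))).2.2 || decide (pvGet ps (k : Int) ≠ 0))
        = (wSt ps N (N - k)).2.2 := by
      rw [hstep]; simp only [wSt]; rw [hidx]
    have hfold : ∀ x : Int, -(PySem.Int.floordiv (-x) cap) = cdiv x cap := fun _ => rfl
    simp only [altGo, hfold]
    rw [h2d, h2p, h3d, h3p, h1d, h1p, ih N hk', Finset.sum_range_succ]
    ring

-- ===== VERDICT (by name: the statement is the Claim_ definition above) =====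
theorem solution_spec : Claim_equal_solution := by
  intro cap n ds ps hdom hpre
  rcases hpre with hneg | ⟨hc, hn, hld, hlp⟩
  · -- n ≤ 0: the range is empty on both sides and both programs return 0
    unfold Spec_solution solution solution_alt
    have hrange : PySem.List.pyRange 0 n 1 = [] := PySem.List.pyRange_one_eq_nil hneg
    have htn : n.toNat = 0 := by omega
    simp [mkHome, hrange, htn, outerA, altGo]
  unfold Spec_solution
  unfold solution solution_alt
  have hInvD := inv_mkHome ds n
  have hInvP := inv_mkHome ps n
  -- A side
  have hfuel : phi ((mkHome ds n).reverse) + phi ((mkHome ps n).reverse) <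
      (((mkHome ds n).reverse.map (fun pb => pb.2.natAbs + 1)).sum
        + ((mkHome ps n).reverse.map (fun pb => pb.2.natAbs + 1)).sum + 1) := by
    have h1 := Gex_le_abs 1 ((mkHome ds n).reverse)
    have h2 := Gex_le_abs 1 ((mkHome ps n).reverse)
    have h3 := absSum_cast ((mkHome ds n).reverse)
    have h4 := absSum_cast ((mkHome ps n).reverse)
    have h5 : (0:Int) ≤ ((mkHome ds n).reverse.map (fun pb => (pb.2.natAbs : Int))).sum := by
      refine List.sum_nonneg ?_
      intro x hx
      obtain ⟨pb, _, rfl⟩ := List.mem_map.mp hx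
      positivity
    have h6 : (0:Int) ≤ ((mkHome ps n).reverse.map (fun pb => (pb.2.natAbs : Int))).sum := by
      refine List.sum_nonneg ?_
      intro x hx
      obtain ⟨pb, _, rfl⟩ := List.mem_map.mp hx
      positivity
    unfold phi
    omega
  rw [outer_spec cap hc n.toNat _ _ _ 0 hInvD hInvP hfuel, zero_add]
  -- B side
  have hw0d : wSt ds n.toNat (n.toNat - n.toNat) = (0, 0, false) := by
    rw [Nat.sub_self]; rfl
  have hw0p : wSt ps n.toNat (n.toNat - n.toNat) = (0, 0, false) := by
    rw [Nat.sub_self]; rfl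
  have halt := altGo_inv cap ds ps n.toNat n.toNat le_rfl 0
  rw [hw0d, hw0p] at halt
  simp only at halt
  rw [halt, zero_add]
  -- identify the two sums term by term
  refine Finset.sum_congr rfl ?_
  intro i hi
  have hiN : i < n.toNat := Finset.mem_range.mp hi
  have hcN : n.toNat - i ≤ n.toNat := by omega
  have hNNi : n.toNat - (n.toNat - i) = i := by omega
  obtain ⟨hs, hm, hf⟩ := wSt_spec ds n (n.toNat - i) hcN
  obtain ⟨hs', hm', hf'⟩ := wSt_spec ps n (n.toNat - i) hcN
  rw [hNNi] at hm hf hm' hf'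
  unfold cnt
  rw [hm, hm']
  congr 2
  · by_cases h : ((i : Nat) : Int) + 1 ≤ headPos ((mkHome ds n).reverse)
    · rw [if_pos (hf.mpr h), if_pos h]
    · rw [if_neg (fun hh => h (hf.mp hh)), if_neg h]
  · by_cases h : ((i : Nat) : Int) + 1 ≤ headPos ((mkHome ps n).reverse)
    · rw [if_pos (hf'.mpr h), if_pos h]
    · rw [if_neg (fun hh => h (hf'.mp hh)), if_neg h]
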